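-- pv_equiv track=rewrite | github.com/automl/ParameterImportance | pimp/utils/bokeh_helpers.py | shorten_unique
-- ===== SOURCE A (Python) =====
-- def shorten_unique(names, keep_first=4, keep_last=4):
--     """
--     Shorten strings, inserting '(...)', while keeping them unique.
--
--     Parameters
--     ----------
--     names: List[str]
--         list of strings to be shortened
--     keep_first: int
--         always keep the first N letters
--     keep_last: int
--         always keep the last N letters
--
--     Returns
--     -------
--     shortened_names: List[str]
--         list with shortened strings
--     """
--     short, cut_chars, longest_str = [], 0, max([len(p) for p in names])
--     while len(set(short)) != len(set(names)) and cut_chars <= longest_str: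
--         short = [p[:keep_first + cut_chars] + '(...)' + p[-keep_last:]
--                  if len(p) > sum([keep_first, keep_last, cut_chars])
--                  else p for p in names]
--         cut_chars += 1
--     return short
-- ===== SOURCE B (Python) =====
-- def shorten_unique(names, keep_first=4, keep_last=4):
--     longest = max(len(p) for p in names)
--     target = len(set(names))
--
--     def cut(p, c):
--         if len(p) <= keep_first + keep_last + c:
--             return p
--         return p[:keep_first + c] + '(...)' + p[-keep_last:]
--
--     def distinct_at(c):
--         return len({cut(p, c) for p in names}) == target
--
--     # The distinct count is monotone in c (for keep counts >= 0), so binary-search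
--     # the smallest sufficient cut instead of scanning cuts one by one.
--     lo, hi = 0, longest
--     while lo < hi:
--         mid = (lo + hi) // 2
--         if distinct_at(mid):
--             hi = mid
--         else:
--             lo = mid + 1
--     return [cut(p, lo) for p in names]
-- ===== Notes on version B (the rewrite author's own statement) =====
-- stated objective: alternative
-- what changed: B replaces A's linear scan of cut_chars (rebuilding and re-testing the shortened list at 0,1,2,... until distinct) by a binary search over the cut length, exploiting that the number of distinct shortened strings is monotone in the cut for nonnegative keep counts, and builds the returned list once at the end; on typical inputs A stops after very few cuts, so B is not measurably faster.
-- outside the precondition, e.g. on shorten_unique([], 4, 4): A raises ValueError, B raises ValueError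
import Mathlib
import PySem

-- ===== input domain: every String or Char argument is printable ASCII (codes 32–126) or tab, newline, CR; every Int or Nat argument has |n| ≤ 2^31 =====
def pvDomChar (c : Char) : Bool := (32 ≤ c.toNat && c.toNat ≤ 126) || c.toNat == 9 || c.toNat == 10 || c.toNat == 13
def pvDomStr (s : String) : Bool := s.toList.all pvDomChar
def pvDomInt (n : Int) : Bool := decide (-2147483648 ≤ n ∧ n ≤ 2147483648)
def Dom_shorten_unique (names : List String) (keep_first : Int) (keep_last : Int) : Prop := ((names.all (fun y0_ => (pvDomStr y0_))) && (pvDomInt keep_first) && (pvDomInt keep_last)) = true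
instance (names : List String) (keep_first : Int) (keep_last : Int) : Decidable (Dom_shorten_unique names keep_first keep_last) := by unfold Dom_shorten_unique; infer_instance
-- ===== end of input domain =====

-- B replaces A's linear scan of cut_chars by a binary search over the cut length (the number of
-- distinct shortened strings is monotone in the cut for nonnegative keep counts) and builds the
-- returned list once at the end.

-- ===== PORT A =====
-- the list comprehension inside A's while body, at the current cut_chars
def pvShortA (names : List String) (keep_first keep_last cut_chars : Int) : List String :=
  names.map (fun p =>
    if (PySem.Str.len p : Int) > ([keep_first, keep_last, cut_chars].sum) then
      PySem.Str.slice p none (some (keep_first + cut_chars)) ++ "(...)" ++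
        PySem.Str.slice p (some (-keep_last)) none
    else p)

-- A's while loop: state (short, cut_chars); fuel bounds the ≤ longest+1 iterations
def pvLoopA (names : List String) (keep_first keep_last longest : Int) :
    Nat → List String → Int → List String
  | 0, short, _ => short
  | fuel + 1, short, cut_chars =>
      if (PySem.Set.ofList short).length ≠ (PySem.Set.ofList names).length ∧ cut_chars ≤ longest then
        pvLoopA names keep_first keep_last longest fuel
          (pvShortA names keep_first keep_last cut_chars) (cut_chars + 1)
      else short

def shorten_unique (names : List String) (keep_first : Int) (keep_last : Int) : List String :=
  match PySem.List.max? (names.map (fun p => (PySem.Str.len p : Int))) (fun x => x) with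
  | none => []  -- max([]) raises ValueError: outside Pre_
  | some longest => pvLoopA names keep_first keep_last longest (longest.toNat + 2) [] 0

-- ===== PORT B =====
-- B's cut helper
def pvCutB (keep_first keep_last c : Int) (p : String) : String :=
  if (PySem.Str.len p : Int) ≤ keep_first + keep_last + c then p
  else PySem.Str.slice p none (some (keep_first + c)) ++ "(...)" ++
         PySem.Str.slice p (some (-keep_last)) none

-- B's distinct_at predicate
def pvDistB (names : List String) (keep_first keep_last : Int) (target : Nat) (c : Int) : Bool :=
  (PySem.Set.ofList (names.map (pvCutB keep_first keep_last c))).length == target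

-- B's binary-search loop over [lo, hi]; fuel is the Lean bound for the ≤ longest halvings
def pvBSearch (names : List String) (keep_first keep_last : Int) (target : Nat) :
    Nat → Int → Int → Int
  | 0, lo, _ => lo
  | fuel + 1, lo, hi =>
      if lo < hi then
        let mid := PySem.Int.floordiv (lo + hi) 2
        if pvDistB names keep_first keep_last target mid then
          pvBSearch names keep_first keep_last target fuel lo mid
        else
          pvBSearch names keep_first keep_last target fuel (mid + 1) hi
      else lo

def shorten_unique_alt (names : List String) (keep_first : Int) (keep_last : Int) : List String :=
  match PySem.List.max? (names.map (fun p => (PySem.Str.len p : Int))) (fun x => x) with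
  | none => []  -- max of empty generator raises ValueError: outside Pre_
  | some longest =>
      let target := (PySem.Set.ofList names).length
      let c := pvBSearch names keep_first keep_last target longest.toNat 0 longest
      names.map (pvCutB keep_first keep_last c)

-- ===== PRECONDITION & SPEC =====
-- Pre_ excludes (a) the empty list, on which both A and B raise ValueError (max of empty
-- sequence), and (b) negative keep counts, which lie outside the natural domain of
-- 'keep the first/last N letters': Python's negative-slice wraparound there makes A's output an
-- accident of its implementation and B's binary search does not reproduce it (see claim cites).
def Pre_shorten_unique (names : List String) (keep_first : Int) (keep_last : Int) : Prop :=
  names ≠ [] ∧ 0 ≤ keep_first ∧ 0 ≤ keep_last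
instance (names : List String) (keep_first : Int) (keep_last : Int) : Decidable (Pre_shorten_unique names keep_first keep_last) := by unfold Pre_shorten_unique; infer_instance

def pvWitness_shorten_unique : List String × Int × Int := (["alphabet_x", "alphabet_y", "ab"], 4, 4)

def Spec_shorten_unique (names : List String) (keep_first : Int) (keep_last : Int) (out : List String) : Prop := out = shorten_unique_alt names keep_first keep_last
instance (names : List String) (keep_first : Int) (keep_last : Int) (out : List String) : Decidable (Spec_shorten_unique names keep_first keep_last out) := by unfold Spec_shorten_unique; infer_instance

-- ===== CLAIM (what is proved, stated in full; the proofs are below) =====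
def Claim_equal_shorten_unique : Prop := ∀ (names : List String) (keep_first : Int) (keep_last : Int), Dom_shorten_unique names keep_first keep_last → Pre_shorten_unique names keep_first keep_last → Spec_shorten_unique names keep_first keep_last (shorten_unique names keep_first keep_last)

-- ===== LEMMAS AND PROOFS =====

-- the number of distinct shortened strings at cut c
def pvCnt (names : List String) (kf kl c : Int) : Nat :=
  (PySem.Set.ofList (names.map (pvCutB kf kl c))).length

-- list-level form of pvCutB (proof helper)
def pvCutL (keep_first keep_last c : Int) (s : List Char) : List Char :=
  if (s.length : Int) ≤ keep_first + keep_last + c then s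
  else s.take (keep_first + c).toNat ++ ['(', '.', '.', '.', ')'] ++
         PySem.List.slice s (some (-keep_last)) none

lemma toList_cutB (kf kl c : Int) (hkfc : 0 ≤ kf + c) (p : String) :
    (pvCutB kf kl c p).toList = pvCutL kf kl c p.toList := by
  unfold pvCutB pvCutL
  split_ifs with h1 h2 h2
  · rfl
  · simp [PySem.Str.len_eq] at h1 h2; omega
  · simp [PySem.Str.len_eq] at h1 h2; omega
  · simp [PySem.Str.slice, PySem.Chars.slice_eq_listSlice, PySem.List.slice_to _ hkfc]

lemma setLen_eq_card (l : List String) :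
    (PySem.Set.ofList l).length = l.toFinset.card := by
  have hnd := PySem.Set.nodup_ofList (α := String) (xs := l)
  have hm : ∀ x, x ∈ PySem.Set.ofList l ↔ x ∈ l := fun x => PySem.Set.mem_ofList l x
  have : (PySem.Set.ofList l).toFinset = l.toFinset := by
    ext x; simp [List.mem_toFinset, hm]
  rw [← List.toFinset_card_of_nodup hnd, this]

-- length of the Python suffix p[-kl:] for 0 ≤ kl ≤ len
lemma suffix_len (kl : Int) (hkl : 0 ≤ kl) (s : List Char) (hles : kl ≤ (s.length : Int)) :
    ((PySem.List.slice s (some (-kl)) none).length : Int) = if kl = 0 then (s.length : Int) else kl := by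
  rcases Int.eq_ofNat_of_zero_le hkl with ⟨k, rfl⟩
  by_cases hk : k = 0
  · subst hk; simp [PySem.List.slice_none_none]
  · rw [PySem.List.slice_from_neg_natCast s k (by omega)]
    simp only [List.length_drop]
    have : k ≤ s.length := by exact_mod_cast hles
    split_ifs with h
    · omega
    · omega

-- collisions between shortened strings only disappear as the cut grows (list level)
lemma cutL_collapse (kf kl c : Int) (hkf : 0 ≤ kf) (hkl : 0 ≤ kl) (hc : 0 ≤ c)
    (s t : List Char) (h : pvCutL kf kl (c + 1) s = pvCutL kf kl (c + 1) t) :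
    pvCutL kf kl c s = pvCutL kf kl c t := by
  unfold pvCutL at h
  by_cases hs : (s.length : Int) ≤ kf + kl + (c + 1) <;>
    by_cases ht : (t.length : Int) ≤ kf + kl + (c + 1)
  · -- both untouched: s = t
    rw [if_pos hs, if_pos ht] at h
    rw [h]
  · -- s untouched, t cut: impossible by length
    rw [if_pos hs, if_neg ht] at h
    exfalso
    have hlen := congrArg List.length h
    have hsuf := suffix_len kl hkl t (by omega)
    simp only [List.length_append, List.length_take, List.length_cons, List.length_nil] at hlen
    have htk : (kf + c + 1).toNat ≤ t.length := by omega
    split_ifs at hsuf with h0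
    · omega
    · omega
  · -- t untouched, s cut: impossible by length
    rw [if_neg hs, if_pos ht] at h
    exfalso
    have hlen := congrArg List.length h
    have hsuf := suffix_len kl hkl s (by omega)
    simp only [List.length_append, List.length_take, List.length_cons, List.length_nil] at hlen
    have hsk : (kf + c + 1).toNat ≤ s.length := by omega
    split_ifs at hsuf with h0
    · omega
    · omega
  · -- both cut at c+1: equal prefixes shrink, suffixes carry over
    rw [if_neg hs, if_neg ht] at h
    have hsk : (kf + (c + 1)).toNat ≤ s.length := by omega
    have htk : (kf + (c + 1)).toNat ≤ t.length := by omega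
    have hinj := List.append_inj (by simpa using h)
      (by simp [List.length_take]; omega)
    obtain ⟨hpre, hrest⟩ := hinj
    have hsuf : PySem.List.slice s (some (-kl)) none = PySem.List.slice t (some (-kl)) none := by
      simpa using hrest
    have hpre' : s.take (kf + c).toNat = t.take (kf + c).toNat := by
      calc s.take (kf + c).toNat = (s.take (kf + (c + 1)).toNat).take (kf + c).toNat := by
            rw [List.take_take]; congr 1; omega
        _ = (t.take (kf + (c + 1)).toNat).take (kf + c).toNat := by rw [hpre]
        _ = t.take (kf + c).toNat := by rw [List.take_take]; congr 1; omega
    unfold pvCutL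
    rw [if_neg (by omega), if_neg (by omega), hpre', hsuf]

lemma cutB_collapse (kf kl c : Int) (hkf : 0 ≤ kf) (hkl : 0 ≤ kl) (hc : 0 ≤ c)
    (p q : String) (h : pvCutB kf kl (c + 1) p = pvCutB kf kl (c + 1) q) :
    pvCutB kf kl c p = pvCutB kf kl c q := by
  apply String.toList_inj.mp
  rw [toList_cutB kf kl c (by omega), toList_cutB kf kl c (by omega)]
  exact cutL_collapse kf kl c hkf hkl hc _ _ (by
    rw [← toList_cutB kf kl (c+1) (by omega), ← toList_cutB kf kl (c+1) (by omega), h])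

lemma cnt_eq (names : List String) (kf kl c : Int) :
    pvCnt names kf kl c = (names.toFinset.image (pvCutB kf kl c)).card := by
  rw [pvCnt, setLen_eq_card]
  congr 1
  ext x
  simp [List.mem_toFinset, Finset.mem_image, List.mem_map]

-- monotonicity of the distinctness predicate
lemma cnt_mono (names : List String) (kf kl c : Int) (hkf : 0 ≤ kf) (hkl : 0 ≤ kl) (hc : 0 ≤ c)
    (h : pvCnt names kf kl c = (PySem.Set.ofList names).length) :
    pvCnt names kf kl (c + 1) = (PySem.Set.ofList names).length := by
  rw [cnt_eq, setLen_eq_card] at h ⊢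
  have hinj : Set.InjOn (pvCutB kf kl c) ↑names.toFinset :=
    Finset.card_image_iff.mp h
  refine Finset.card_image_iff.mpr ?_
  intro p hp q hq hpq
  exact hinj hp hq (cutB_collapse kf kl c hkf hkl hc p q hpq)

lemma cnt_mono' (names : List String) (kf kl : Int) (hkf : 0 ≤ kf) (hkl : 0 ≤ kl)
    (c d : Int) (hc : 0 ≤ c) (hcd : c ≤ d)
    (h : pvCnt names kf kl c = (PySem.Set.ofList names).length) :
    pvCnt names kf kl d = (PySem.Set.ofList names).length := by
  have key : ∀ n : Nat, pvCnt names kf kl (c + n) = (PySem.Set.ofList names).length := by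
    intro n
    induction n with
    | zero => simpa using h
    | succ n ih =>
        have := cnt_mono names kf kl (c + n) hkf hkl (by positivity) ih
        convert this using 2
        push_cast; ring
  have hd : d = c + ((d - c).toNat : Int) := by omega
  rw [hd]
  exact key _

-- A's comprehension computes, elementwise, B's cut function
lemma pvShortA_eq_map_cut (names : List String) (k l c : Int) :
    pvShortA names k l c = names.map (pvCutB k l c) := by
  unfold pvShortA pvCutB
  apply List.map_congr_left
  intro p _
  simp only [List.sum_cons, List.sum_nil, add_zero]
  split_ifs with h1 h2 h2 <;> first | rfl | omega

-- at c = longest nothing is cut, so the count reaches the target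
lemma cnt_longest (names : List String) (kf kl longest : Int) (hkf : 0 ≤ kf) (hkl : 0 ≤ kl)
    (hmax : ∀ p ∈ names, (PySem.Str.len p : Int) ≤ longest) :
    pvCnt names kf kl longest = (PySem.Set.ofList names).length := by
  unfold pvCnt
  congr 2
  conv_rhs => rw [← List.map_id names]
  apply List.map_congr_left
  intro p hp
  unfold pvCutB
  rw [if_pos (by have := hmax p hp; omega)]
  rfl

-- A's loop, started at the list built for cut 0, lands on the minimal sufficient cut M
lemma loopA_run (names : List String) (kf kl longest : Int) (M : Nat)
    (hQM : pvCnt names kf kl (M : Int) = (PySem.Set.ofList names).length)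
    (hmin : ∀ k : Nat, k < M → pvCnt names kf kl (k : Int) ≠ (PySem.Set.ofList names).length)
    (hMlong : (M : Int) ≤ longest) :
    ∀ (fuel : Nat) (c : Nat), c ≤ M → M - c < fuel →
      pvLoopA names kf kl longest fuel (names.map (pvCutB kf kl (c : Int))) ((c : Int) + 1)
        = names.map (pvCutB kf kl (M : Int)) := by
  intro fuel
  induction fuel with
  | zero => intro c _ h; omega
  | succ fuel ih =>
      intro c hcM hfuel
      rw [pvLoopA]
      by_cases hc : c = M
      · subst hc
        rw [if_neg]
        intro ⟨h1, _⟩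
        exact h1 hQM
      · have hlt : c < M := by omega
        rw [if_pos ⟨hmin c hlt, by omega⟩, pvShortA_eq_map_cut]
        have := ih (c + 1) (by omega) (by omega)
        push_cast at this ⊢
        convert this using 3

-- B's binary search lands on the same minimal sufficient cut M
lemma bsearch_run (names : List String) (kf kl : Int) (hkf : 0 ≤ kf) (hkl : 0 ≤ kl) (M : Nat)
    (hQM : pvCnt names kf kl (M : Int) = (PySem.Set.ofList names).length)
    (hmin : ∀ k : Nat, k < M → pvCnt names kf kl (k : Int) ≠ (PySem.Set.ofList names).length) :
    ∀ (fuel : Nat) (lo hi : Int), 0 ≤ lo → lo ≤ (M : Int) → (M : Int) ≤ hi →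
      (hi - lo).toNat ≤ fuel →
      pvBSearch names kf kl (PySem.Set.ofList names).length fuel lo hi = (M : Int) := by
  intro fuel
  induction fuel with
  | zero =>
      intro lo hi h0 hlo hhi hf
      have : lo = hi := by omega
      subst this
      rw [pvBSearch]
      omega
  | succ fuel ih =>
      intro lo hi h0 hlo hhi hf
      rw [pvBSearch]
      by_cases hlh : lo < hi
      · rw [if_pos hlh]
        set mid := PySem.Int.floordiv (lo + hi) 2 with hmid
        have hb : lo ≤ mid ∧ mid < hi := by
          constructor
          · rw [hmid, PySem.Int.le_floordiv_iff_mul_le (by omega)]; omega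
          · rw [hmid, PySem.Int.floordiv_lt_iff_lt_mul (by omega)]; omega
        by_cases hd : pvDistB names kf kl (PySem.Set.ofList names).length mid = true
        · rw [if_pos hd]
          have hPmid : pvCnt names kf kl mid = (PySem.Set.ofList names).length := by
            unfold pvDistB at hd
            unfold pvCnt
            exact beq_iff_eq.mp hd
          have hMmid : (M : Int) ≤ mid := by
            by_contra hcon
            rw [not_le] at hcon
            have h1 : (0:Int) ≤ mid := by omega
            have : pvCnt names kf kl ((mid.toNat : Nat) : Int) ≠ _ :=
              hmin mid.toNat (by omega)
            rw [show ((mid.toNat : Nat) : Int) = mid by omega] at this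
            exact this hPmid
          exact ih lo mid h0 hlo hMmid (by omega)
        · rw [if_neg hd]
          have hPmid : pvCnt names kf kl mid ≠ (PySem.Set.ofList names).length := by
            unfold pvDistB at hd
            intro hcon
            exact hd (by simpa using hcon)
          have hmidM : mid + 1 ≤ (M : Int) := by
            by_contra hcon
            rw [not_le] at hcon
            exact hPmid (cnt_mono' names kf kl hkf hkl (M : Int) mid (by omega) (by omega) hQM)
          exact ih (mid + 1) hi (by omega) hmidM hhi (by omega)
      · rw [if_neg hlh]
        omega

-- ===== VERDICT (by name: the statement is the Claim_ definition above) =====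
theorem shorten_unique_spec : Claim_equal_shorten_unique := by
  intro names kf kl _hDom hPre
  obtain ⟨hne, hkf, hkl⟩ := hPre
  unfold Spec_shorten_unique shorten_unique shorten_unique_alt
  obtain ⟨longest, hmax⟩ : ∃ v, PySem.List.max?
      (names.map (fun p => (PySem.Str.len p : Int))) (fun x => x) = some v := by
    rcases h : PySem.List.max? (names.map (fun p => (PySem.Str.len p : Int))) (fun x => x) with _ | v
    · rw [PySem.List.max?_eq_none_iff] at h
      simp only [List.map_eq_nil_iff] at h
      exact absurd h hne
    · exact ⟨v, rfl⟩
  have hlong0 : 0 ≤ longest := by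
    have hmem := PySem.List.max?_mem hmax
    rw [List.mem_map] at hmem
    obtain ⟨p, _, hp⟩ := hmem
    have hp' : ((PySem.Str.len p : Int)) = longest := hp
    rw [PySem.Str.len_eq] at hp'
    omega
  have hmaxall : ∀ p ∈ names, (PySem.Str.len p : Int) ≤ longest := by
    intro p hp
    exact PySem.List.max?_isMax hmax _ (List.mem_map_of_mem hp)
  have hQtop : pvCnt names kf kl ((longest.toNat : Nat) : Int) = (PySem.Set.ofList names).length := by
    rw [show ((longest.toNat : Nat) : Int) = longest by omega]
    exact cnt_longest names kf kl longest hkf hkl hmaxall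
  have hex : ∃ n : Nat, pvCnt names kf kl (n : Int) = (PySem.Set.ofList names).length :=
    ⟨longest.toNat, hQtop⟩
  have hQM : pvCnt names kf kl ((Nat.find hex : Nat) : Int) = (PySem.Set.ofList names).length :=
    Nat.find_spec hex
  have hmin : ∀ k : Nat, k < Nat.find hex →
      pvCnt names kf kl (k : Int) ≠ (PySem.Set.ofList names).length :=
    fun k hk => Nat.find_min hex hk
  have hMle : Nat.find hex ≤ longest.toNat := Nat.find_le hQtop
  have hzero : (PySem.Set.ofList ([] : List String)).length ≠ (PySem.Set.ofList names).length := by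
    rw [setLen_eq_card, setLen_eq_card]
    cases names with
    | nil => exact absurd rfl hne
    | cons a t =>
        have : 0 < (a :: t).toFinset.card := Finset.card_pos.mpr ⟨a, by simp⟩
        simp only [List.toFinset_nil, Finset.card_empty]
        omega
  have hA : pvLoopA names kf kl longest (longest.toNat + 2) [] 0 =
      names.map (pvCutB kf kl ((Nat.find hex : Nat) : Int)) := by
    rw [show longest.toNat + 2 = (longest.toNat + 1) + 1 from rfl, pvLoopA,
      if_pos ⟨hzero, hlong0⟩, pvShortA_eq_map_cut]
    have := loopA_run names kf kl longest (Nat.find hex) hQM hmin (by omega)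
      (longest.toNat + 1) 0 (by omega) (by omega)
    simpa using this
  have hB : pvBSearch names kf kl (PySem.Set.ofList names).length longest.toNat 0 longest =
      ((Nat.find hex : Nat) : Int) :=
    bsearch_run names kf kl hkf hkl (Nat.find hex) hQM hmin longest.toNat 0 longest
      le_rfl (by omega) (by omega) (by omega)
  simp only [hmax, hA, hB]
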